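-- pv_equiv track=rewrite | github.com/PARKHYOJIN2/parkhyojin | Class_Probability_Output_Network.py | clustering_onehot
-- ===== SOURCE A (Python) =====
-- def clustering_onehot(x_data, y_data) :
--     zero, onehot_type = [], []
--     [zero.append(0) for i in range(len(y_data[0]))]
--     for i in range(len(y_data[0])) :
--         temp = zero + []
--         temp[i] = 1
--         onehot_type.append(temp)
--
--     friend = []
--     [friend.append([]) for i in range(len(y_data[0]))]
--     for i in range(len(y_data)) :
--         for j in range(len(onehot_type)) :
--             if y_data[i] == onehot_type[j] :
--                 friend[j].append(x_data[i])
--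
--     return friend
-- ===== SOURCE B (Python) =====
-- def clustering_onehot(x_data, y_data):
--     n = len(y_data[0])
--     friend = [[] for _ in range(n)]
--     for i, row in enumerate(y_data):
--         # row matches a one-hot template iff it has width n, only 0/1 entries
--         # and exactly one 1; its class is the position of that 1.
--         if len(row) == n and all(v == 0 or v == 1 for v in row) and sum(row) == 1:
--             friend[row.index(1)].append(x_data[i])
--     return friend
-- ===== Notes on version B (the rewrite author's own statement) =====
-- stated objective: faster
-- what changed: B never builds the one-hot template list at all: it classifies each label row arithmetically (entries in {0,1}, sum 1) and buckets by the position of the 1, replacing A's per-row scan comparing against every template.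
import Mathlib
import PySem

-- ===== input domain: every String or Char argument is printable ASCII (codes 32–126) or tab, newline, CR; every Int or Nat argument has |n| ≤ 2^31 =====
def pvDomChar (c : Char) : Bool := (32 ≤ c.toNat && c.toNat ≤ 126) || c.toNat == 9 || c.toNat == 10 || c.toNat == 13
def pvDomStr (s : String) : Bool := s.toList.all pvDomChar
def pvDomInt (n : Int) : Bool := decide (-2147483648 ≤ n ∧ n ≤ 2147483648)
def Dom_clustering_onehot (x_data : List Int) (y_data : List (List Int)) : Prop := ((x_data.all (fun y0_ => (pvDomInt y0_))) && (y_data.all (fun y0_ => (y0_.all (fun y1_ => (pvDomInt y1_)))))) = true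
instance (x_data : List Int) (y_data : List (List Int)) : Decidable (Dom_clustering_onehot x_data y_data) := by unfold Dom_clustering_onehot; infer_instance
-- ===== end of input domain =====

-- B never builds the one-hot template list: it classifies each label row arithmetically
-- (entries in {0,1}, sum 1) and buckets by the position of the 1 (objective: faster).


-- ===== PORT A =====
def clustering_onehot (x_data : List Int) (y_data : List (List Int)) : List (List Int) :=
  -- zero = [0]*len(y_data[0]) built by appending; onehot_type[j] = zero with a 1 at j
  let zero : List Int :=
    (PySem.List.pyRange 0 ((PySem.List.pyGetD y_data 0 []).length : Int)).foldl
      (fun z _ => z ++ [(0 : Int)]) []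
  let onehot : List (List Int) :=
    (PySem.List.pyRange 0 ((PySem.List.pyGetD y_data 0 []).length : Int)).foldl
      (fun acc i => acc ++ [zero.set i.toNat 1]) []
  let friend0 : List (List Int) :=
    (PySem.List.pyRange 0 ((PySem.List.pyGetD y_data 0 []).length : Int)).foldl
      (fun acc _ => acc ++ [([] : List Int)]) []
  (PySem.List.pyRange 0 (y_data.length : Int)).foldl (fun fr i =>
    (PySem.List.pyRange 0 (onehot.length : Int)).foldl (fun fr2 j =>
      if PySem.List.pyGetD y_data i [] = PySem.List.pyGetD onehot j [] then
        fr2.set j.toNat (fr2.getD j.toNat [] ++ [PySem.List.pyGetD x_data i 0])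
      else fr2) fr) friend0

-- ===== PORT B =====
def clustering_onehot_alt (x_data : List Int) (y_data : List (List Int)) : List (List Int) :=
  let n := (y_data.headD []).length
  y_data.zipIdx.foldl (fun fr p =>
      if p.1.length = n ∧ (∀ v ∈ p.1, v = (0 : Int) ∨ v = 1) ∧ p.1.sum = (1 : Int) then
        -- row.index(1); the guard guarantees 1 ∈ row, so the none branch is unreachable
        match PySem.List.index? p.1 (1 : Int) with
        | some j => fr.set j (fr.getD j [] ++ [PySem.List.pyGetD x_data (p.2 : Int) 0])
        | none => fr
      else fr)
    (List.replicate n ([] : List Int))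

-- ===== PRECONDITION & SPEC =====
-- Pre_ excludes exactly the inputs where Python A raises an IndexError: empty y_data
-- (y_data[0]), and a one-hot row at an index i ≥ len(x_data) (x_data[i] on the match).
def Pre_clustering_onehot (x_data : List Int) (y_data : List (List Int)) : Prop :=
  y_data ≠ [] ∧ ∀ i < y_data.length,
    y_data.getD i [] ∈ (List.range (y_data.headD []).length).map
      (fun j => (List.replicate (y_data.headD []).length (0 : Int)).set j 1) →
    i < x_data.length
instance (x_data : List Int) (y_data : List (List Int)) : Decidable (Pre_clustering_onehot x_data y_data) := by unfold Pre_clustering_onehot; infer_instance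

def pvWitness_clustering_onehot : List Int × List (List Int) :=
  ([3, 4, 5], [[1, 0], [0, 1], [2, 2]])

def Spec_clustering_onehot (x_data : List Int) (y_data : List (List Int)) (out : List (List Int)) : Prop := out = clustering_onehot_alt x_data y_data
instance (x_data : List Int) (y_data : List (List Int)) (out : List (List Int)) : Decidable (Spec_clustering_onehot x_data y_data out) := by unfold Spec_clustering_onehot; infer_instance

-- ===== CLAIM (what is proved, stated in full; the proofs are below) =====
def Claim_equal_clustering_onehot : Prop := ∀ (x_data : List Int) (y_data : List (List Int)), Dom_clustering_onehot x_data y_data → Pre_clustering_onehot x_data y_data → Spec_clustering_onehot x_data y_data (clustering_onehot x_data y_data)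

-- ===== LEMMAS AND PROOFS =====

-- the j-th one-hot template of width n
def pvTmpl (n j : Nat) : List Int := (List.replicate n (0 : Int)).set j 1

theorem pvTmpl_inj {n j k : Nat} (hj : j < n) (hk : k < n)
    (h : pvTmpl n j = pvTmpl n k) : j = k := by
  by_contra hne
  have := congrArg (fun l => l[j]?) h
  simp only [pvTmpl] at this
  rw [List.getElem?_set_self (by simpa using hj),
      List.getElem?_set_ne (by simpa using Ne.symm hne)] at this
  simp [hj] at this

theorem pvTmpl_zero (n : Nat) : pvTmpl (n + 1) 0 = 1 :: List.replicate n 0 := by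
  simp [pvTmpl, List.replicate_succ]

theorem pvTmpl_succ (n j : Nat) : pvTmpl (n + 1) (j + 1) = 0 :: pvTmpl n j := by
  simp [pvTmpl, List.replicate_succ]

-- direction →: a template satisfies B's arithmetic test, with index of the 1 = j
theorem pvTmpl_props : ∀ (n j : Nat), j < n →
    (pvTmpl n j).length = n ∧ (∀ v ∈ pvTmpl n j, v = 0 ∨ v = 1) ∧
    (pvTmpl n j).sum = 1 ∧ PySem.List.index? (pvTmpl n j) 1 = some j := by
  intro n
  induction n with
  | zero => intro j hj; omega
  | succ n ih =>
    intro j hj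
    cases j with
    | zero =>
      rw [pvTmpl_zero]
      refine ⟨by simp, ?_, by simp, PySem.List.index?_cons_self ..⟩
      intro v hv
      rcases List.mem_cons.mp hv with h | h
      · right; exact h
      · left; exact List.eq_of_mem_replicate h
    | succ j =>
      have hjn : j < n := by omega
      obtain ⟨hl, hm, hs, hi⟩ := ih j hjn
      rw [pvTmpl_succ]
      refine ⟨by simp [hl], ?_, by simp [hs], ?_⟩
      · intro v hv
        rcases List.mem_cons.mp hv with h | h
        · left; exact h
        · exact hm v h
      · have h01 : (0 : Int) ≠ 1 := by norm_num
        rw [PySem.List.index?_cons_of_ne _ h01, hi]; rfl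

-- a 0/1 list has nonnegative sum
theorem pvSum_nonneg : ∀ (r : List Int), (∀ v ∈ r, v = 0 ∨ v = 1) → 0 ≤ r.sum := by
  intro r
  induction r with
  | nil => intro _; simp
  | cons v r ih =>
    intro h
    have hv := h v (by simp)
    have := ih (fun w hw => h w (by simp [hw]))
    simp only [List.sum_cons]
    rcases hv with h0 | h1 <;> omega

-- a 0/1 list with sum 0 is all zeros
theorem pvAllZero : ∀ (r : List Int), (∀ v ∈ r, v = 0 ∨ v = 1) → r.sum = 0 →
    r = List.replicate r.length 0 := by
  intro r
  induction r with
  | nil => intro _ _; rfl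
  | cons v r ih =>
    intro h hs
    have hv := h v (by simp)
    have hrest : ∀ w ∈ r, w = 0 ∨ w = 1 := fun w hw => h w (by simp [hw])
    have hnn := pvSum_nonneg r hrest
    simp only [List.sum_cons] at hs
    have hv0 : v = 0 := by
      rcases hv with h0 | h1
      · exact h0
      · omega
    have hr0 : r.sum = 0 := by omega
    rw [hv0, ih hrest hr0]
    simp [List.replicate_succ]

-- direction ←: a row passing B's test is the template at the index of its 1
theorem pvRow_tmpl : ∀ (r : List Int), (∀ v ∈ r, v = 0 ∨ v = 1) → r.sum = 1 →
    ∃ j, PySem.List.index? r 1 = some j ∧ j < r.length ∧ r = pvTmpl r.length j := by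
  intro r
  induction r with
  | nil => intro _ hs; simp at hs
  | cons v r ih =>
    intro h hs
    have hv := h v (by simp)
    have hrest : ∀ w ∈ r, w = 0 ∨ w = 1 := fun w hw => h w (by simp [hw])
    simp only [List.sum_cons] at hs
    rcases hv with h0 | h1
    · have hr1 : r.sum = 1 := by omega
      obtain ⟨j, hi, hj, he⟩ := ih hrest hr1
      refine ⟨j + 1, ?_, by simpa using Nat.succ_lt_succ hj, ?_⟩
      · have h01 : (0 : Int) ≠ 1 := by norm_num
        rw [h0, PySem.List.index?_cons_of_ne _ h01, hi]; rfl
      · simp only [List.length_cons, pvTmpl_succ, h0]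
        exact congrArg (List.cons 0) he
    · have hr0 : r.sum = 0 := by omega
      refine ⟨0, ?_, by simp, ?_⟩
      · rw [h1]; exact PySem.List.index?_cons_self ..
      · rw [h1, List.length_cons, pvTmpl_zero, pvAllZero r hrest hr0]
        simp
    
-- find? over a list with (at most) a unique match
theorem pvFind_unique {l : List Nat} {p : Nat → Bool} {j : Nat}
    (hj : j ∈ l) (hpj : p j) (huniq : ∀ k ∈ l, p k → k = j) :
    l.find? p = some j := by
  induction l with
  | nil => simp at hj
  | cons a l ih =>
    by_cases hpa : p a
    · have haj : a = j := huniq a (by simp) hpa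
      subst haj
      simp [List.find?_cons, hpa]
    · rw [List.find?_cons_of_neg hpa]
      have hj' : j ∈ l := by
        rcases List.mem_cons.mp hj with h | h
        · exact absurd (h ▸ hpj) (by simp [hpa])
        · exact h
      exact ih hj' (fun k hk => huniq k (by simp [hk]))

-- the key bridge: A's first matching template = B's arithmetic classification
theorem pvFindTmpl (n : Nat) (r : List Int) :
    (List.range n).find? (fun j => decide (r = pvTmpl n j)) =
      if r.length = n ∧ (∀ v ∈ r, v = 0 ∨ v = 1) ∧ r.sum = 1 then
        PySem.List.index? r 1 else none := by
  split_ifs with hc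
  · obtain ⟨hl, hm, hs⟩ := hc
    obtain ⟨j, hi, hj, he⟩ := pvRow_tmpl r hm hs
    have hjn : j < n := hl ▸ hj
    have hrt : r = pvTmpl n j := hl ▸ he
    rw [hi]
    refine pvFind_unique (List.mem_range.mpr hjn) (by simp [← hrt]) ?_
    intro k hk hpk
    exact pvTmpl_inj (List.mem_range.mp hk) hjn
      ((of_decide_eq_true hpk).symm.trans hrt)
  · cases hf : (List.range n).find? (fun j => decide (r = pvTmpl n j)) with
    | none => rfl
    | some j =>
      exfalso
      have hpj' := List.find?_some hf
      simp only [decide_eq_true_eq] at hpj'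
      have hpj : r = pvTmpl n j := hpj'
      have hjn : j < n := List.mem_range.mp (List.mem_of_find?_eq_some hf)
      obtain ⟨hl, hm, hs, _⟩ := pvTmpl_props n j hjn
      exact hc ⟨hpj ▸ hl, hpj ▸ hm, hpj ▸ hs⟩

-- a fold applying f at the (at most one) index satisfying P is the first-match lookup
theorem pvFoldFind {β : Type} (m : Nat) (P : Nat → Bool) (f : β → Nat → β)
    (huniq : ∀ j k, j < m → k < m → P j → P k → j = k) (fr : β) :
    (List.range m).foldl (fun a j => if P j then f a j else a) fr =
      (match (List.range m).find? P with
       | some j => f fr j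
       | none => fr) := by
  induction m generalizing fr with
  | zero => simp
  | succ m ih =>
    have huniq' : ∀ j k, j < m → k < m → P j → P k → j = k := fun j k hj hk =>
      huniq j k (Nat.lt_succ_of_lt hj) (Nat.lt_succ_of_lt hk)
    rw [List.range_succ, List.foldl_append, List.find?_append, ih huniq']
    cases hfind : (List.range m).find? P with
    | some j =>
      have hPj := List.find?_some hfind
      have hjm : j < m := by simpa using List.mem_of_find?_eq_some hfind
      have hPm : P m = false := by
        by_contra h
        have := huniq j m (Nat.lt_succ_of_lt hjm) (Nat.lt_succ_self m) hPj
          (by simpa using h)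
        omega
      simp [hPm]
    | none =>
      simp only [List.foldl_cons, List.foldl_nil, List.find?_cons, Option.none_or]
      cases hPm : P m <;> simp

-- a fold over zipIdx as a fold over indices
theorem pvZipIdxFoldl {α β : Type} (l : List α) (d : α) (g : β → α × Nat → β) :
    ∀ (k : Nat) (init : β),
      (l.zipIdx k).foldl g init =
        (List.range l.length).foldl (fun a i => g a (l.getD i d, k + i)) init := by
  induction l with
  | nil => intro k init; simp
  | cons a l ih =>
    intro k init
    rw [List.zipIdx_cons, List.foldl_cons, ih (k + 1),
        List.length_cons, List.range_succ_eq_map, List.foldl_cons, List.foldl_map]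
    simp only [List.getD_cons_zero, List.getD_cons_succ, Nat.add_zero]
    apply PySem.List.foldl_congr_mem
    intro acc x _
    have : k + 1 + x = k + (x + 1) := by omega
    rw [this]

theorem pvHeadGetD (y : List (List Int)) :
    PySem.List.pyGetD y 0 [] = y.headD [] := by
  cases y <;> simp [PySem.List.pyGetD, PySem.List.pyGet?, PySem.List.pyIdx?]

-- ===== VERDICT (by name: the statement is the Claim_ definition above) =====
theorem clustering_onehot_spec : Claim_equal_clustering_onehot := by
  intro x y _hDom _hPre
  unfold Spec_clustering_onehot
  show clustering_onehot x y = clustering_onehot_alt x y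
  delta clustering_onehot clustering_onehot_alt
  simp only [pvHeadGetD]
  simp only [PySem.List.pyRange_zero_natCast, List.foldl_map,
    PySem.List.foldl_append_singleton_eq_map, List.nil_append, Int.toNat_natCast,
    List.map_const', List.length_map, List.length_range, PySem.List.pyGetD_natCast]
  rw [pvZipIdxFoldl y [] _ 0]
  apply PySem.List.foldl_congr_mem
  intro fr i _hi
  simp only [Nat.zero_add]
  have hstep : (List.range (y.headD []).length).foldl
      (fun fr2 j => if y.getD i [] =
          (List.getD ((List.range (y.headD []).length).map
            (fun k => (List.replicate (y.headD []).length (0 : Int)).set k 1)) j [])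
        then fr2.set j (fr2.getD j [] ++ [x.getD i 0]) else fr2) fr =
      (List.range (y.headD []).length).foldl
      (fun fr2 j => if decide (y.getD i [] = pvTmpl (y.headD []).length j) = true
        then fr2.set j (fr2.getD j [] ++ [x.getD i 0]) else fr2) fr := by
    apply PySem.List.foldl_congr_mem
    intro acc j hj
    have hjn : j < (y.headD []).length := List.mem_range.mp hj
    have hr : (List.range (y.head?.getD []).length)[j]? = some j := by
      rw [List.getElem?_eq_getElem (by cases y <;> simpa using hjn)]
      simp
    simp [hr, pvTmpl]
  rw [hstep, pvFoldFind (y.headD []).length _ _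
    (fun j k hj hk pj pk => pvTmpl_inj hj hk
      ((of_decide_eq_true pj).symm.trans (of_decide_eq_true pk))),
    pvFindTmpl]
  split_ifs with hc
  · rfl
  · rfl
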